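-- pv_equiv track=rewrite | github.com/Richardlr03/SyncsCampMurder | name_generation/generator.py | poker_groups
-- ===== SOURCE A (Python) =====
-- CARDS_VALUE_DICT = {
--     "A": 1, "B": 3, "C": 3, "D": 4, "E": 5, "F": 6,
--     "G": 7, "H": 8, "I": 9, "J": 10, "K": 11, "L": 12,
--     "M": 13, "N": 1, "O": 2, "P": 3, "Q": 4, "R": 5,
--     "S": 6, "T": 7, "U": 8, "V": 9, "W": 10, "X": 11,
--     "Y": 12, "Z": 13,
-- }
--
-- def poker_rank_value(char):
--     rank = CARDS_VALUE_DICT[char.upper()]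
--     # Keep hash logic unchanged; only tie-break comparison treats Ace as high.
--     return 14 if rank == 1 else rank
--
-- def poker_groups(name):
--     ranks = [poker_rank_value(char) for char in name if char.upper() in CARDS_VALUE_DICT]
--     groups = []
--     for i in range(0, len(ranks), 5):
--         group = ranks[i:i + 5]
--         if len(group) == 5:
--             groups.append(group)
--     return groups
-- ===== SOURCE B (Python) =====
-- CARDS_VALUE_DICT = {
--     "A": 1, "B": 3, "C": 3, "D": 4, "E": 5, "F": 6,
--     "G": 7, "H": 8, "I": 9, "J": 10, "K": 11, "L": 12,
--     "M": 13, "N": 1, "O": 2, "P": 3, "Q": 4, "R": 5,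
--     "S": 6, "T": 7, "U": 8, "V": 9, "W": 10, "X": 11,
--     "Y": 12, "Z": 13,
-- }
--
-- def poker_groups(name):
--     # One streaming pass: fill a 5-card buffer and flush it into groups.
--     groups = []
--     current = []
--     for char in name:
--         rank = CARDS_VALUE_DICT.get(char.upper())
--         if rank is not None:
--             current.append(14 if rank == 1 else rank)
--             if len(current) == 5:
--                 groups.append(current)
--                 current = []
--     return groups
-- ===== Notes on version B (the rewrite author's own statement) =====
-- stated objective: simpler
-- what changed: Replaced the two-phase build-all-ranks-then-index-slice structure with a single streaming pass that fills a 5-element buffer and flushes it into the result, dropping a short trailing buffer.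
import Mathlib
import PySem

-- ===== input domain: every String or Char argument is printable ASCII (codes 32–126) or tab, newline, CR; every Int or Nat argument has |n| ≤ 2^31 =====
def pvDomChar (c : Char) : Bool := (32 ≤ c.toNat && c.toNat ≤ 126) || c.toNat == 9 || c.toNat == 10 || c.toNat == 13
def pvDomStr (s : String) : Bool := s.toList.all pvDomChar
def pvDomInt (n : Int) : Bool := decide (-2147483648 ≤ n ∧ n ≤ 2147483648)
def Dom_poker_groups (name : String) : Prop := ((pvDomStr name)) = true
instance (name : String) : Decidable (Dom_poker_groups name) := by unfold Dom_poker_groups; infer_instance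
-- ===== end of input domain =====

-- B fuses A's build-ranks-then-slice phases into one streaming pass with a 5-element buffer (objective: simpler; same cost).

-- ===== PORT A =====
def cardsValueDict : PySem.Dict Char Int := PySem.Dict.ofList
  [('A', 1), ('B', 3), ('C', 3), ('D', 4), ('E', 5), ('F', 6),
   ('G', 7), ('H', 8), ('I', 9), ('J', 10), ('K', 11), ('L', 12),
   ('M', 13), ('N', 1), ('O', 2), ('P', 3), ('Q', 4), ('R', 5),
   ('S', 6), ('T', 7), ('U', 8), ('V', 9), ('W', 10), ('X', 11),
   ('Y', 12), ('Z', 13)]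

-- Python's CARDS_VALUE_DICT[char.upper()] raises KeyError when absent; A only calls this
-- under the membership guard, so the `none` branch (default 0) is unreachable in A.
def poker_rank_value (c : Char) : Int :=
  match cardsValueDict.get? (PySem.Chars.upperChar c) with
  | some rank => if rank = 1 then 14 else rank
  | none => 0

def poker_groups (name : String) : List (List Int) :=
  let ranks : List Int :=
    (name.toList.filter (fun c => cardsValueDict.contains (PySem.Chars.upperChar c))).map
      poker_rank_value
  let groups : List (List Int) :=
    (PySem.List.pyRange 0 (ranks.length : Int) 5).foldl
      (fun gs i =>
        let group := PySem.List.slice ranks (some i) (some (i + 5))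
        if group.length = 5 then gs ++ [group] else gs)
      []
  groups

-- ===== PORT B =====
def poker_groups_alt (name : String) : List (List Int) :=
  (name.toList.foldl
    (fun (st : List (List Int) × List Int) c =>
      match cardsValueDict.get? (PySem.Chars.upperChar c) with
      | some rank =>
          let current := st.2 ++ [if rank = 1 then 14 else rank]
          if current.length = 5 then (st.1 ++ [current], []) else (st.1, current)
      | none => st)
    ([], [])).1

-- ===== PRECONDITION & SPEC =====
def Spec_poker_groups (name : String) (out : List (List Int)) : Prop := out = poker_groups_alt name
instance (name : String) (out : List (List Int)) : Decidable (Spec_poker_groups name out) := by unfold Spec_poker_groups; infer_instance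

-- ===== CLAIM (what is proved, stated in full; the proofs are below) =====
def Claim_equal_poker_groups : Prop := ∀ (name : String), Dom_poker_groups name → Spec_poker_groups name (poker_groups name)

-- ===== LEMMAS AND PROOFS =====

-- Reference chunking: split into groups of 5, dropping a short tail.
def chunk5 (l : List Int) : List (List Int) :=
  if h : 5 ≤ l.length then l.take 5 :: chunk5 (l.drop 5) else []
termination_by l.length
decreasing_by simp; omega

lemma chunk5_short (l : List Int) (h : l.length < 5) : chunk5 l = [] := by
  rw [chunk5]; simp [Nat.not_le.mpr h]

lemma chunk5_long (l : List Int) (h : 5 ≤ l.length) :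
    chunk5 l = l.take 5 :: chunk5 (l.drop 5) := by
  rw [chunk5]; simp [h]

lemma pyRange_five_nil (a b : Int) (h : b ≤ a) : PySem.List.pyRange a b 5 = [] := by
  rw [PySem.List.pyRange_of_pos a b (by norm_num)]
  simp [Int.not_lt.mpr h]

lemma pyRange_five_cons (a b : Int) (h : a < b) :
    PySem.List.pyRange a b 5 = a :: PySem.List.pyRange (a + 5) b 5 := by
  rw [PySem.List.pyRange_of_pos a b (by norm_num),
      PySem.List.pyRange_of_pos (a + 5) b (by norm_num)]
  have hm : ((b - a + 5 - 1) / 5).toNat =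
      (if a + 5 < b then ((b - (a + 5) + 5 - 1) / 5).toNat else 0) + 1 := by
    split_ifs with h5 <;> omega
  rw [if_pos h, hm, List.range_succ_eq_map]
  simp only [List.map_cons, List.map_map]
  refine List.cons_eq_cons.mpr ⟨by norm_num, ?_⟩
  apply List.map_congr_left
  intro k _
  simp only [Function.comp_apply]
  push_cast
  ring

-- A's slicing loop, generalized over the start index, computes chunk5 of the tail.
lemma A_loop (l : List Int) (i : Nat) (gs : List (List Int)) :
    (PySem.List.pyRange (i : Int) (l.length : Int) 5).foldl
      (fun gs j =>
        let group := PySem.List.slice l (some j) (some (j + 5))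
        if group.length = 5 then gs ++ [group] else gs)
      gs = gs ++ chunk5 (l.drop i) := by
  by_cases hi : l.length ≤ i
  · rw [pyRange_five_nil _ _ (by exact_mod_cast hi)]
    rw [chunk5_short _ (by simp only [List.length_drop]; omega)]
    simp
  · push_neg at hi
    rw [pyRange_five_cons _ _ (by exact_mod_cast hi)]
    simp only [List.foldl_cons]
    have hstep5 : ((i : Int) + 5) = ((i + 5 : Nat) : Int) := by push_cast; ring
    rw [hstep5, A_loop l (i + 5)]
    have hslice : PySem.List.slice l (some ((i : Nat) : Int)) (some ((i + 5 : Nat) : Int)) =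
        (l.drop i).take 5 := by
      rw [PySem.List.slice_natCast]
      congr 1
      omega
    simp only [hslice]
    by_cases h5 : 5 ≤ l.length - i
    · rw [if_pos (by simp only [List.length_take, List.length_drop]; omega)]
      rw [chunk5_long (l.drop i) (by simp only [List.length_drop]; omega)]
      rw [List.drop_drop]
      rw [show i + 5 = 5 + i from Nat.add_comm i 5]
      simp [List.append_assoc]
    · rw [if_neg (by simp only [List.length_take, List.length_drop]; omega)]
      rw [chunk5_short (l.drop i) (by simp only [List.length_drop]; omega),
          chunk5_short (l.drop (i + 5)) (by simp only [List.length_drop]; omega)]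
termination_by l.length - i
decreasing_by omega

-- B's buffer step on a rank value.
def step5 (st : List (List Int) × List Int) (v : Int) : List (List Int) × List Int :=
  let current := st.2 ++ [v]
  if current.length = 5 then (st.1 ++ [current], []) else (st.1, current)

-- B's buffer loop over the rank values computes chunk5.
lemma B_loop (l : List Int) (gs : List (List Int)) (cur : List Int) (hc : cur.length < 5) :
    (l.foldl step5 (gs, cur)).1 = gs ++ chunk5 (cur ++ l) := by
  induction l generalizing gs cur with
  | nil => simp [chunk5_short cur (by simpa using hc)]
  | cons x xs ih =>
    simp only [List.foldl_cons]
    by_cases h5 : (cur ++ [x]).length = 5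
    · have hstep : step5 (gs, cur) x = (gs ++ [cur ++ [x]], []) := by
        simp [step5, h5]
      rw [hstep, ih _ _ (by norm_num)]
      have hkey : chunk5 (cur ++ x :: xs) = (cur ++ [x]) :: chunk5 xs := by
        rw [show cur ++ x :: xs = (cur ++ [x]) ++ xs from by simp]
        rw [chunk5_long _ (by rw [List.length_append, h5]; omega)]
        rw [List.take_left' h5, List.drop_left' h5]
      rw [hkey]
      simp
    · have hstep : step5 (gs, cur) x = (gs, cur ++ [x]) := by
        have h4 : cur.length ≠ 4 := by simp at h5; omega
        simp [step5, h4]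
      rw [hstep, ih _ _ (by simp only [List.length_append, List.length_cons,
        List.length_nil] at h5 ⊢; omega)]
      rw [List.append_assoc]
      simp

-- The char-level fold of B equals the rank-level fold over A's comprehension list.
lemma B_chars (cs : List Char) (st : List (List Int) × List Int) :
    cs.foldl
      (fun (st : List (List Int) × List Int) c =>
        match cardsValueDict.get? (PySem.Chars.upperChar c) with
        | some rank =>
            let current := st.2 ++ [if rank = 1 then 14 else rank]
            if current.length = 5 then (st.1 ++ [current], []) else (st.1, current)
        | none => st)
      st
    = ((cs.filter (fun c => cardsValueDict.contains (PySem.Chars.upperChar c))).map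
        poker_rank_value).foldl step5 st := by
  induction cs generalizing st with
  | nil => rfl
  | cons c cs ih =>
    cases h : cardsValueDict.get? (PySem.Chars.upperChar c) with
    | some r =>
      have hmem : cardsValueDict.contains (PySem.Chars.upperChar c) = true := by
        cases hcc : cardsValueDict.contains (PySem.Chars.upperChar c)
        · exact absurd h (by rw [(PySem.Dict.get?_eq_none_iff_contains _ _).mpr hcc]; simp)
        · rfl
      simp only [List.foldl_cons, List.filter_cons, hmem, if_true, List.map_cons, h]
      rw [ih]
      congr 1
      simp [poker_rank_value, h, step5]
    | none =>
      have hmem : cardsValueDict.contains (PySem.Chars.upperChar c) = false :=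
        (PySem.Dict.get?_eq_none_iff_contains _ _).mp h
      simp only [List.foldl_cons, List.filter_cons, hmem, h]
      simp only [Bool.false_eq_true, if_false]
      exact ih st

-- ===== VERDICT (by name: the statement is the Claim_ definition above) =====
theorem poker_groups_spec : Claim_equal_poker_groups := by
  intro name _
  unfold Spec_poker_groups poker_groups poker_groups_alt
  dsimp only
  rw [B_chars]
  have hA := A_loop
    ((name.toList.filter (fun c => cardsValueDict.contains (PySem.Chars.upperChar c))).map
      poker_rank_value) 0 []
  have hB := B_loop
    ((name.toList.filter (fun c => cardsValueDict.contains (PySem.Chars.upperChar c))).map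
      poker_rank_value) [] [] (by norm_num)
  simp only [Nat.cast_zero, List.drop_zero, List.nil_append] at hA hB
  rw [hA, hB]
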